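-- pv_equiv track=rewrite | github.com/sgsuh/hackerrank | test1.py | funWithAnagrams
-- ===== SOURCE A (Python) =====
-- def funWithAnagrams(s):
--     # Write your code here
--
--     result = []
--     result.append(s[0])
--
--     for i in range(1, len(s)):
--
--         flag = 0
--
--         for j in range(len(result)):
--             if len(s[i]) == len(result[j]):
--
--                 temp_s = list(s[i])
--                 temp_r = list(result[j])
--
--                 while len(temp_r) > 0:
--
--                     remove = 0
--
--                     for itr in range(len(temp_s)):
--                         if temp_r[0] == temp_s[itr]:
--                             temp_r.pop(0)
--                             temp_s.pop(itr)
--                             remove = 1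
--                             break
--
--                     if remove == 0:
--                         break
--
--                 if remove == 1:
--                     flag = 1
--                     break
--
--         if flag == 0:
--             result.append(s[i])
--
--     result.sort()
--
--     return result
-- ===== SOURCE B (Python) =====
-- def funWithAnagrams(s):
--     seen = {}
--     for w in s:
--         k = ''.join(sorted(w))
--         if k not in seen:
--             seen[k] = w
--     return sorted(seen.values())
-- ===== Notes on version B (the rewrite author's own statement) =====
-- stated objective: faster
-- what changed: Replaced the nested scan over kept results with a repeated O(L^2) char-removal anagram test by a single pass that hashes each string under its sorted-character signature, keeping the first representative per class, then sorts.
-- outside the precondition, e.g. on funWithAnagrams(['ab', 'cd', '', '']): A returns ['', '', 'ab', 'cd'], B returns ['', 'ab', 'cd']; on funWithAnagrams(['', '']): A raises UnboundLocalError, B returns ['']; on funWithAnagrams([]): A raises IndexError, B returns []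
import Mathlib
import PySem

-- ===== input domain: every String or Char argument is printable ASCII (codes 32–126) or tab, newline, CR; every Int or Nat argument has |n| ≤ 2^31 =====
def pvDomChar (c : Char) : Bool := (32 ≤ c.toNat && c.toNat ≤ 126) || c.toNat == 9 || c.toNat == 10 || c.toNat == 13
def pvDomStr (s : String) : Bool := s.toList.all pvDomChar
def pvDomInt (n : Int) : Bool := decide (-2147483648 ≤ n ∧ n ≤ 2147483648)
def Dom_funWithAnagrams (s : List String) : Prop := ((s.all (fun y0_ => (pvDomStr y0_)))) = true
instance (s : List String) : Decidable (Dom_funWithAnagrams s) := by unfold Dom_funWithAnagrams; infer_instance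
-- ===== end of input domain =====

-- B replaces A's quadratic scan with a sorted-character-signature hash (keep first per class), then sorts.

-- ===== PORT A =====
-- inner 'for itr' loop: find the first position of c in ts and pop it (none = no match, remove = 0)
def pvPopMatch (c : Char) (ts : List Char) : Option (List Char) :=
  match ts with
  | [] => none
  | x :: xs => if x = c then some xs else (pvPopMatch c xs).map (x :: ·)

-- the 'while len(temp_r) > 0' loop; true = ended with remove == 1 (temp_r drained), false = remove == 0
def pvDrain (tr ts : List Char) : Bool :=
  match tr with
  | [] => true
  | c :: tr' =>
    match pvPopMatch c ts with
    | some ts' => pvDrain tr' ts'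
    | none => false

def funWithAnagrams (s : List String) : List String :=
  match s with
  | [] => []  -- Python raises IndexError on s[0]; excluded by Pre_
  | h :: t =>
    let result := t.foldl (fun res si =>
      -- 'for j in range(len(result))' with break on flag = any
      if res.any (fun rj => si.toList.length == rj.toList.length && pvDrain rj.toList si.toList)
      then res
      else res ++ [si]) [h]
    PySem.List.sorted result (fun x => x) false

-- ===== PORT B =====
-- k = ''.join(sorted(w))
def pvSig (w : String) : String := String.ofList (PySem.List.sorted w.toList (fun c => c) false)

def funWithAnagrams_alt (s : List String) : List String :=
  let seen := s.foldl (fun d w =>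
    let k := pvSig w
    if PySem.Dict.contains d k then d else PySem.Dict.insert d k w)
    PySem.Dict.empty
  PySem.List.sorted (PySem.Dict.values seen) (fun x => x) false

-- ===== PRECONDITION & SPEC =====
-- Pre_ excludes the empty list (A raises IndexError on s[0]) and lists with two or more empty
-- strings, where the first ''-vs-'' comparison reads the loop variable `remove` before the while
-- loop ever assigns it: A then raises UnboundLocalError or, from leftover state, accidentally
-- duplicates '' in the output.
def Pre_funWithAnagrams (s : List String) : Prop := s ≠ [] ∧ PySem.List.count s "" ≤ 1
instance (s : List String) : Decidable (Pre_funWithAnagrams s) := by unfold Pre_funWithAnagrams; infer_instance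
def pvWitness_funWithAnagrams : List String := ["code", "doce", "framer", "frame"]

def Spec_funWithAnagrams (s : List String) (out : List String) : Prop := out = funWithAnagrams_alt s
instance (s : List String) (out : List String) : Decidable (Spec_funWithAnagrams s out) := by unfold Spec_funWithAnagrams; infer_instance

-- ===== CLAIM (what is proved, stated in full; the proofs are below) =====
def Claim_equal_funWithAnagrams : Prop := ∀ (s : List String), Dom_funWithAnagrams s → Pre_funWithAnagrams s → Spec_funWithAnagrams s (funWithAnagrams s)

-- ===== LEMMAS AND PROOFS =====

theorem pvPopMatch_eq (c : Char) (ts : List Char) :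
    pvPopMatch c ts = if c ∈ ts then some (ts.erase c) else none := by
  induction ts with
  | nil => simp [pvPopMatch]
  | cons x xs ih =>
    simp only [pvPopMatch, List.erase_cons, List.mem_cons]
    by_cases hx : x = c
    · simp [hx]
    · have hcx : ¬ c = x := fun h => hx h.symm
      rw [if_neg hx, ih]
      by_cases hmem : c ∈ xs
      · simp [hmem, hcx]
        exact fun h => absurd h hx
      · simp [hmem, hcx]

theorem pvDrain_iff (tr : List Char) : ∀ ts : List Char,
    pvDrain tr ts = true ↔ (tr : Multiset Char) ≤ (ts : Multiset Char) := by
  induction tr with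
  | nil => intro ts; simp [pvDrain]
  | cons c tr' ih =>
    intro ts
    rw [pvDrain, pvPopMatch_eq]
    by_cases hc : c ∈ ts
    · have hco : (c ::ₘ ((ts : Multiset Char).erase c)) = (ts : Multiset Char) :=
        Multiset.cons_erase (by exact_mod_cast hc)
      simp only [hc, if_true]
      rw [ih, ← hco, ← Multiset.cons_coe, Multiset.cons_le_cons_iff, ← Multiset.coe_erase]
    · simp only [hc, if_false]
      constructor
      · intro h; cases h
      · intro h
        have hcmem : c ∈ (ts : Multiset Char) :=
          Multiset.mem_of_le h (by rw [← Multiset.cons_coe]; exact Multiset.mem_cons_self c _)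
        exact absurd (by exact_mod_cast hcmem) hc

theorem pvAnagram_iff (si rj : String) :
    (si.toList.length == rj.toList.length && pvDrain rj.toList si.toList) = true ↔
      rj.toList.Perm si.toList := by
  rw [Bool.and_eq_true, beq_iff_eq, pvDrain_iff, ← Multiset.coe_eq_coe]
  constructor
  · rintro ⟨hlen, hle⟩
    exact Multiset.eq_of_le_of_card_le hle (by simp [hlen])
  · intro h
    constructor
    · have := congrArg Multiset.card h
      simpa using this.symm
    · exact le_of_eq h

theorem pvSig_eq_iff (a b : String) : pvSig a = pvSig b ↔ a.toList.Perm b.toList := by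
  unfold pvSig
  rw [← PySem.List.sorted_id_eq_sorted_id_iff_perm]
  exact ⟨fun h => String.ofList_inj.1 h, fun h => congrArg _ h⟩

theorem pvLoop_inv (t : List String) : ∀ (res : List String) (d : PySem.Dict String String),
    d.items = res.map (fun w => (pvSig w, w)) →
    (t.foldl (fun d w =>
        let k := pvSig w
        if PySem.Dict.contains d k then d else PySem.Dict.insert d k w) d).items =
    (t.foldl (fun res si =>
        if res.any (fun rj => si.toList.length == rj.toList.length && pvDrain rj.toList si.toList)
        then res else res ++ [si]) res).map (fun w => (pvSig w, w)) := by
  induction t with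
  | nil => intro res d h; simpa using h
  | cons w t ih =>
    intro res d h
    have hkeys : d.keys = res.map pvSig := by
      simp [PySem.Dict.keys, h, Function.comp]
    have hcond : PySem.Dict.contains d (pvSig w) = true ↔
        res.any (fun rj => w.toList.length == rj.toList.length && pvDrain rj.toList w.toList) = true := by
      rw [PySem.Dict.contains_iff_mem_keys, hkeys, List.any_eq_true]
      simp only [List.mem_map]
      constructor
      · rintro ⟨rj, hrj, hsig⟩
        exact ⟨rj, hrj, (pvAnagram_iff w rj).2 ((pvSig_eq_iff rj w).1 hsig)⟩
      · rintro ⟨rj, hrj, hperm⟩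
        exact ⟨rj, hrj, (pvSig_eq_iff rj w).2 ((pvAnagram_iff w rj).1 hperm)⟩
    simp only [List.foldl_cons]
    by_cases hmem : PySem.Dict.contains d (pvSig w) = true
    · rw [if_pos hmem, if_pos (hcond.1 hmem)]
      exact ih res d h
    · rw [if_neg hmem, if_neg (fun hc => hmem (hcond.2 hc))]
      apply ih (res ++ [w])
      rw [PySem.Dict.items_insert_of_not_contains _ _ (by simpa using hmem), h]
      simp

theorem funWithAnagrams_spec : Claim_equal_funWithAnagrams := by
  intro s _ hpre
  obtain ⟨hne, -⟩ := hpre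
  unfold Spec_funWithAnagrams funWithAnagrams funWithAnagrams_alt
  match s, hne with
  | h :: t, _ =>
    simp only [List.foldl_cons]
    have h1 : (PySem.Dict.contains (PySem.Dict.empty : PySem.Dict String String) (pvSig h)) = false :=
      PySem.Dict.contains_empty _
    rw [h1]
    simp only [Bool.false_eq_true, if_false]
    have hinit : (PySem.Dict.insert (PySem.Dict.empty : PySem.Dict String String) (pvSig h) h).items =
        [h].map (fun w => (pvSig w, w)) := by
      rw [PySem.Dict.items_insert_of_not_contains _ _ h1]
      simp [PySem.Dict.empty]
    have := pvLoop_inv t [h] _ hinit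
    show PySem.List.sorted _ _ false = PySem.List.sorted (PySem.Dict.values _) _ false
    congr 1
    rw [PySem.Dict.values, this, List.map_map]
    have hid : ((fun p => p.2) ∘ fun w => ((pvSig w, w) : String × String)) = id :=
      funext (fun w => rfl)
    rw [hid, List.map_id]
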